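-- pv_equiv track=rewrite | github.com/NourKired/Synge | src/benchmark/functions.py | combinliste
-- ===== SOURCE A (Python) =====
-- def combinliste(seq, k):
--     """
--     Doc: cette fonction renvoie en sortie les differents combinaison de k elem parmis seq
--     utile pour generer les diffentes combinaision des dimensions pour les plots
--     """
--     p = []
--     i, imax = 0, 2 ** len(seq) - 1
--     while i <= imax:
--         s = []
--         j, jmax = 0, len(seq) - 1
--         while j <= jmax:
--             if (i >> j) & 1 == 1:
--                 s.append(seq[j])
--             j += 1
--         if len(s) == k:
--             p.append(s)
--         i += 1
--     return p
-- ===== SOURCE B (Python) =====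
-- def combinliste(seq, k):
--     if k < 0:
--         return []
--     if not seq:
--         return [[]] if k == 0 else []
--     init, last = seq[:-1], seq[-1]
--     return combinliste(init, k) + [s + [last] for s in combinliste(init, k - 1)]
-- ===== Notes on version B (the rewrite author's own statement) =====
-- stated objective: alternative
-- what changed: A scans every one of the 2^n bitmasks and rebuilds each candidate subset bit by bit; B recurses on the last element (subsets without it, then subsets with it appended), which yields the same bitmask-increasing order with no bit arithmetic at all.
import Mathlib
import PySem

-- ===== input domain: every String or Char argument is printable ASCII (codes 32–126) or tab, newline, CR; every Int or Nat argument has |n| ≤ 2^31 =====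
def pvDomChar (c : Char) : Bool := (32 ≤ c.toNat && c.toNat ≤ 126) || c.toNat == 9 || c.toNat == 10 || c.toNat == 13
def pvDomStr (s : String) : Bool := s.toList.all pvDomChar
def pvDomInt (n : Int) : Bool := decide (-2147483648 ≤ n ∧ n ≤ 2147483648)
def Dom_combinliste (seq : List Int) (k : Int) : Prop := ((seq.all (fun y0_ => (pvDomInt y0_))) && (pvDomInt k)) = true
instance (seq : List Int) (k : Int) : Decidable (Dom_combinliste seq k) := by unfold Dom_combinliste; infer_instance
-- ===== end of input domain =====

-- B replaces A's scan of all 2^n bitmasks by a recursion on the last element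
-- (subsets without it, then subsets with it), which preserves A's output order.

-- ===== PORT A =====
-- inner while loop: j = 0..len(seq)-1, appending seq[j] when bit j of i is set.
-- The loop counter i is a non-negative Python int, ported as Nat; seq[j] with
-- 0 ≤ j < len(seq) is always in range, ported as getD j 0 (the default is never used).
def combinliste_inner (seq : List Int) (i : Nat) : List Int :=
  (List.range seq.length).foldl
    (fun s j => if (i >>> j) &&& 1 = 1 then s ++ [seq.getD j 0] else s) []

-- outer while loop: i = 0..2^len(seq)-1, i.e. i ∈ range (2^len(seq))
def combinliste (seq : List Int) (k : Int) : List (List Int) :=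
  (List.range (2 ^ seq.length)).foldl
    (fun p i =>
      let s := combinliste_inner seq i
      if (s.length : Int) = k then p ++ [s] else p) []

-- ===== PORT B =====
def combinliste_alt (seq : List Int) (k : Int) : List (List Int) :=
  if k < 0 then []
  else if hs : seq = [] then (if k = 0 then [[]] else [])
  else
    combinliste_alt seq.dropLast k ++
      (combinliste_alt seq.dropLast (k - 1)).map (fun s => s ++ [seq.getLast hs])
termination_by seq.length
decreasing_by all_goals
  (have := List.length_pos_of_ne_nil hs; simp [List.length_dropLast]; omega)

-- ===== PRECONDITION & SPEC =====
def Spec_combinliste (seq : List Int) (k : Int) (out : List (List Int)) : Prop := out = combinliste_alt seq k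
instance (seq : List Int) (k : Int) (out : List (List Int)) : Decidable (Spec_combinliste seq k out) := by unfold Spec_combinliste; infer_instance

-- ===== CLAIM (what is proved, stated in full; the proofs are below) =====
def Claim_equal_combinliste : Prop := ∀ (seq : List Int) (k : Int), Dom_combinliste seq k → Spec_combinliste seq k (combinliste seq k)

-- ===== LEMMAS AND PROOFS =====

lemma pv_foldl_congr {α β : Type} (l : List α) (f g : β → α → β) (init : β)
    (h : ∀ acc x, x ∈ l → f acc x = g acc x) : l.foldl f init = l.foldl g init := by
  induction l generalizing init with
  | nil => rfl
  | cons a t ih =>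
    simp only [List.foldl_cons]
    rw [h init a (by simp)]
    exact ih _ (fun acc x hx => h acc x (by simp [hx]))

-- A in filter/map form
lemma combA_eq (seq : List Int) (k : Int) :
    combinliste seq k =
      ((List.range (2 ^ seq.length)).filter
          (fun i => decide (((combinliste_inner seq i).length : Int) = k))).map
        (combinliste_inner seq) := by
  unfold combinliste
  exact PySem.List.foldl_append_ite (p := fun i => ((combinliste_inner seq i).length : Int) = k)
    (f := combinliste_inner seq) _ _

-- low masks of a concat list don't see the last element
lemma inner_concat_lo (init : List Int) (last : Int) (i : Nat) (h : i < 2 ^ init.length) :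
    combinliste_inner (init ++ [last]) i = combinliste_inner init i := by
  unfold combinliste_inner
  rw [List.length_append, List.length_singleton, List.range_succ, List.foldl_append]
  have hstep : ∀ (s : List Int) (j : Nat), j ∈ List.range init.length →
      (if (i >>> j) &&& 1 = 1 then s ++ [(init ++ [last]).getD j 0] else s)
        = (if (i >>> j) &&& 1 = 1 then s ++ [init.getD j 0] else s) := by
    intro s j hj
    rw [List.mem_range] at hj
    rw [List.getD_append _ _ _ _ hj]
  have hbit : (i >>> init.length) &&& 1 = 0 := by
    rw [Nat.shiftRight_eq_div_pow, Nat.div_eq_of_lt h]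
    rfl
  rw [List.foldl_cons, List.foldl_nil, hbit, if_neg (by norm_num)]
  exact pv_foldl_congr _ _ _ _ hstep

-- high masks see the last element, low bits unchanged
lemma inner_concat_hi (init : List Int) (last : Int) (i : Nat) (h : i < 2 ^ init.length) :
    combinliste_inner (init ++ [last]) (2 ^ init.length + i)
      = combinliste_inner init i ++ [last] := by
  unfold combinliste_inner
  rw [List.length_append, List.length_singleton, List.range_succ, List.foldl_append]
  have hstep : ∀ (s : List Int) (j : Nat), j ∈ List.range init.length →
      (if ((2 ^ init.length + i) >>> j) &&& 1 = 1 then s ++ [(init ++ [last]).getD j 0] else s)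
        = (if (i >>> j) &&& 1 = 1 then s ++ [init.getD j 0] else s) := by
    intro s j hj
    rw [List.mem_range] at hj
    have hbits : ((2 ^ init.length + i) >>> j) &&& 1 = (i >>> j) &&& 1 := by
      rw [Nat.and_one_is_mod, Nat.and_one_is_mod, Nat.shiftRight_eq_div_pow,
        Nat.shiftRight_eq_div_pow]
      have hpow : 2 ^ init.length = 2 ^ j * 2 ^ (init.length - j) := by
        rw [← pow_add]
        congr 1
        omega
      rw [hpow, Nat.mul_add_div (Nat.two_pow_pos j)]
      have heven : 2 ^ (init.length - j) % 2 = 0 := by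
        have : init.length - j = (init.length - j - 1) + 1 := by omega
        rw [this, pow_succ]
        omega
      omega
    rw [hbits, List.getD_append _ _ _ _ hj]
  have hbit : ((2 ^ init.length + i) >>> init.length) &&& 1 = 1 := by
    rw [Nat.shiftRight_eq_div_pow, Nat.add_comm, Nat.add_div_right _ (Nat.two_pow_pos _),
      Nat.div_eq_of_lt h]
    rfl
  have hget : (init ++ [last]).getD init.length 0 = last := by
    simp [List.getD]
  rw [List.foldl_cons, List.foldl_nil, hbit, if_pos rfl, hget,
    pv_foldl_congr _ _ _ _ hstep]

lemma combA_neg (seq : List Int) (k : Int) (h : k < 0) : combinliste seq k = [] := by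
  rw [combA_eq]
  have : ∀ i ∈ List.range (2 ^ seq.length),
      ¬ (decide (((combinliste_inner seq i).length : Int) = k) = true) := by
    intro i _
    simp only [decide_eq_true_eq]
    intro hc
    have : (0 : Int) ≤ ((combinliste_inner seq i).length : Int) := Int.natCast_nonneg _
    omega
  rw [List.filter_eq_nil_iff.mpr this]
  rfl

-- A satisfies B's last-element recursion
lemma combA_concat (init : List Int) (last : Int) (k : Int) :
    combinliste (init ++ [last]) k
      = combinliste init k ++ (combinliste init (k - 1)).map (fun s => s ++ [last]) := by
  rw [combA_eq, combA_eq, combA_eq]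
  have hlen : (init ++ [last]).length = init.length + 1 := by simp
  rw [hlen, pow_succ, Nat.mul_two, List.range_add, List.filter_append, List.map_append]
  congr 1
  · -- low half
    have hf : ∀ i ∈ List.range (2 ^ init.length),
        decide (((combinliste_inner (init ++ [last]) i).length : Int) = k)
          = decide (((combinliste_inner init i).length : Int) = k) := by
      intro i hi
      rw [List.mem_range] at hi
      rw [inner_concat_lo _ _ _ hi]
    rw [List.filter_congr hf]
    apply List.map_congr_left
    intro i hi
    have := List.mem_filter.mp hi
    rw [List.mem_range] at this
    exact inner_concat_lo _ _ _ this.1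
  · -- high half
    rw [List.filter_map, List.map_map]
    have hf : ∀ i ∈ List.range (2 ^ init.length),
        ((fun i => decide (((combinliste_inner (init ++ [last]) i).length : Int) = k)) ∘
            (fun i => 2 ^ init.length + i)) i
          = decide (((combinliste_inner init i).length : Int) = k - 1) := by
      intro i hi
      rw [List.mem_range] at hi
      simp only [Function.comp_apply]
      rw [inner_concat_hi _ _ _ hi]
      simp only [List.length_append, List.length_singleton]
      rw [decide_eq_decide]
      push_cast
      omega
    rw [List.filter_congr hf]
    rw [List.map_map]
    apply List.map_congr_left
    intro i hi
    have := List.mem_filter.mp hi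
    rw [List.mem_range] at this
    simp only [Function.comp_apply]
    exact inner_concat_hi _ _ _ this.1

lemma combB_nil (k : Int) :
    combinliste_alt [] k = if k < 0 then [] else if k = 0 then [[]] else [] := by
  rw [combinliste_alt]
  split_ifs <;> first | rfl | exact absurd rfl (by assumption)

lemma combB_concat (init : List Int) (last : Int) (k : Int) (hk : ¬ k < 0) :
    combinliste_alt (init ++ [last]) k
      = combinliste_alt init k ++ (combinliste_alt init (k - 1)).map (fun s => s ++ [last]) := by
  rw [combinliste_alt]
  have hne : init ++ [last] ≠ [] := by simp
  rw [if_neg hk, dif_neg hne, List.dropLast_concat, List.getLast_concat]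

lemma combAB (seq : List Int) : ∀ k : Int, combinliste seq k = combinliste_alt seq k := by
  induction seq using List.reverseRecOn with
  | nil =>
    intro k
    rw [combB_nil]
    have : combinliste [] k = if (0 : Int) = k then [[]] else [] := by
      unfold combinliste combinliste_inner
      norm_num [List.range_succ]
    rw [this]
    split_ifs <;> first | rfl | omega
  | append_singleton init last ih =>
    intro k
    by_cases hk : k < 0
    · rw [combA_neg _ _ hk, combinliste_alt, if_pos hk]
    · rw [combA_concat, combB_concat _ _ _ hk, ih, ih]

-- ===== VERDICT (by name: the statement is the Claim_ definition above) =====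
theorem combinliste_spec : Claim_equal_combinliste := by
  intro seq k _
  unfold Spec_combinliste
  exact combAB seq k
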